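-- pv_equiv track=rewrite | github.com/aaaaaaaahhhhhhhh/AdventOfCode | day2/workings/part2test.py | OneToThree
-- ===== SOURCE A (Python) =====
-- def OneToThree(values):
--     def check_safe(values):
--         """Helper function to check if the report is safe."""
--         for i in range(len(values) - 1):
--             diff = abs(values[i] - values[i + 1])
--             if not (1 <= diff <= 3):
--                 return False
--         return True
--
--     # Try the original list first
--     if check_safe(values):
--         return 0  # No removals needed
--
--     # Try removing one element and check if the resulting list becomes safe
--     for i in range(len(values)):
--         new_values = values[:i] + values[i+1:]
--         if check_safe(new_values):
--             return 1  # 1 removal is sufficient to make it safe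
--
--     return 2  # If no valid single removal is found, it's unsafe even with a removal
-- ===== SOURCE B (Python) =====
-- def OneToThree(values):
--     def ok(vs):
--         return all(1 <= abs(a - b) <= 3 for a, b in zip(vs, vs[1:]))
--
--     # Find the first bad adjacent pair; any fixing removal must be one of its two indices.
--     bad = None
--     for i, (a, b) in enumerate(zip(values, values[1:])):
--         if not (1 <= abs(a - b) <= 3):
--             bad = i
--             break
--     if bad is None:
--         return 0
--     if ok(values[:bad] + values[bad+1:]) or ok(values[:bad+1] + values[bad+2:]):
--         return 1
--     return 2
-- ===== Notes on version B (the rewrite author's own statement) =====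
-- stated objective: faster
-- what changed: Instead of trying to remove every index (each with a full rescan), B finds the first bad adjacent pair and only tests removing its two indices, since any other removal leaves that pair adjacent.
import Mathlib
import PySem

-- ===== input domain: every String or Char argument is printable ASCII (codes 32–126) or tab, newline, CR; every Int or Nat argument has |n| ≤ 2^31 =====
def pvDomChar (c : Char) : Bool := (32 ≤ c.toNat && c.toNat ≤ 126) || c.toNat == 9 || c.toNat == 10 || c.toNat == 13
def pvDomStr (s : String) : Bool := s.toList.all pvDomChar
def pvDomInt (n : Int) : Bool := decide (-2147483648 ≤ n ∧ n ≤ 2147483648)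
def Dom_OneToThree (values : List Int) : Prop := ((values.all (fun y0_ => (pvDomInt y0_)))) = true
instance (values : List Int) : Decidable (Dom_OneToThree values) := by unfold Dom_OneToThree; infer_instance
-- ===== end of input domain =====

-- B finds the first bad adjacent pair and only tests removing its two indices (any other
-- removal leaves that pair adjacent), replacing A's removal attempt at every index: faster.

-- ===== PORT A =====
-- check_safe: index loop over range(len-1) with early False
def checkSafeA (values : List Int) : Bool :=
  (PySem.List.pyRange 0 ((values.length : Int) - 1) 1).all fun i =>
    let diff := |PySem.List.pyGetD values i 0 - PySem.List.pyGetD values (i + 1) 0|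
    decide (1 ≤ diff ∧ diff ≤ 3)

def OneToThree (values : List Int) : Int :=
  if checkSafeA values then 0
  else if (PySem.List.pyRange 0 (values.length : Int) 1).any (fun i =>
      checkSafeA (PySem.List.slice values none (some i) ++
                  PySem.List.slice values (some (i + 1)) none)) then 1
  else 2

-- ===== PORT B =====
def goodPair (a b : Int) : Bool := decide (1 ≤ |a - b| ∧ |a - b| ≤ 3)

-- ok: all over zip(vs, vs[1:])
def okB (vs : List Int) : Bool := (vs.zip vs.tail).all fun p => goodPair p.1 p.2

-- the break-at-first-bad loop over enumerate(zip(values, values[1:]))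
def firstBad : List Int → Option Nat
  | a :: b :: t => if goodPair a b then (firstBad (b :: t)).map (· + 1) else some 0
  | _ => none

def OneToThree_alt (values : List Int) : Int :=
  match firstBad values with
  | none => 0
  | some i =>
    if okB (values.take i ++ values.drop (i + 1)) ||
       okB (values.take (i + 1) ++ values.drop (i + 2)) then 1
    else 2

-- ===== PRECONDITION & SPEC =====
def Spec_OneToThree (values : List Int) (out : Int) : Prop := out = OneToThree_alt values
instance (values : List Int) (out : Int) : Decidable (Spec_OneToThree values out) := by unfold Spec_OneToThree; infer_instance

-- ===== CLAIM (what is proved, stated in full; the proofs are below) =====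
def Claim_equal_OneToThree : Prop := ∀ (values : List Int), Dom_OneToThree values → Spec_OneToThree values (OneToThree values)

-- ===== LEMMAS AND PROOFS =====

-- "every adjacent pair is good", the common meaning of both safety checks
def GoodAll (vs : List Int) : Prop := ∀ k, (h : k + 1 < vs.length) → goodPair vs[k] vs[k+1] = true

theorem okB_cons (a b : Int) (t : List Int) :
    okB (a :: b :: t) = (goodPair a b && okB (b :: t)) := by
  simp [okB, List.zip]

theorem goodAll_cons2 (a b : Int) (t : List Int) :
    GoodAll (a :: b :: t) ↔ goodPair a b = true ∧ GoodAll (b :: t) := by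
  constructor
  · intro h
    refine ⟨h 0 (by simp), fun k hk => ?_⟩
    have h2 := h (k + 1) (by simp at hk ⊢; omega)
    simpa using h2
  · rintro ⟨h1, h2⟩ k hk
    cases k with
    | zero => simpa using h1
    | succ k =>
      have := h2 k (by simp at hk ⊢; omega)
      simpa using this

theorem okB_iff (vs : List Int) : okB vs = true ↔ GoodAll vs := by
  match vs with
  | [] => exact ⟨fun _ k hk => absurd hk (by simp), fun _ => rfl⟩
  | [a] => exact ⟨fun _ k hk => absurd hk (by simp), fun _ => rfl⟩
  | a :: b :: t =>
    rw [okB_cons, Bool.and_eq_true, goodAll_cons2, okB_iff (b :: t)]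

theorem firstBad_none_iff (vs : List Int) : firstBad vs = none ↔ okB vs = true := by
  match vs with
  | [] => simp [firstBad, okB]
  | [a] => simp [firstBad, okB]
  | a :: b :: t =>
    cases hg : goodPair a b
    · simp [firstBad, hg, okB_cons]
    · simp [firstBad, hg, okB_cons, firstBad_none_iff (b :: t)]

theorem firstBad_some (vs : List Int) (i : Nat) (h : firstBad vs = some i) :
    ∃ (hl : i + 1 < vs.length),
      goodPair (vs[i]'(Nat.lt_of_succ_lt hl)) (vs[i+1]'hl) = false := by
  match vs with
  | [] => simp [firstBad] at h
  | [a] => simp [firstBad] at h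
  | a :: b :: t =>
    cases hg : goodPair a b
    · simp [firstBad, hg] at h
      subst h
      exact ⟨by simp, by simpa using hg⟩
    · simp [firstBad, hg] at h
      obtain ⟨i', hi', rfl⟩ := h
      obtain ⟨hlen, hbad⟩ := firstBad_some (b :: t) i' hi'
      refine ⟨by simp at hlen ⊢; omega, ?_⟩
      simpa using hbad

theorem checkSafeA_iff (vs : List Int) : checkSafeA vs = true ↔ GoodAll vs := by
  unfold checkSafeA GoodAll
  rw [List.all_eq_true]
  constructor
  · intro h k hk
    have hm : (k : Int) ∈ PySem.List.pyRange 0 ((vs.length : Int) - 1) 1 := by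
      rw [PySem.List.mem_pyRange_one]; omega
    have h2 := h _ hm
    rw [show ((k : Int) + 1) = ((k + 1 : Nat) : Int) by push_cast; ring] at h2
    simp only [PySem.List.pyGetD_natCast] at h2
    rw [List.getD_eq_getElem _ _ (by omega), List.getD_eq_getElem _ _ (by omega)] at h2
    simpa [goodPair] using h2
  · intro h i hi
    rw [PySem.List.mem_pyRange_one] at hi
    obtain ⟨k, rfl⟩ : ∃ k : Nat, i = (k : Int) := ⟨i.toNat, by omega⟩
    rw [show ((k : Int) + 1) = ((k + 1 : Nat) : Int) by push_cast; ring]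
    simp only [PySem.List.pyGetD_natCast]
    rw [List.getD_eq_getElem _ _ (by omega), List.getD_eq_getElem _ _ (by omega)]
    simpa [goodPair] using h k (by omega)

theorem checkSafeA_eq_okB (vs : List Int) : checkSafeA vs = okB vs := by
  have h := (checkSafeA_iff vs).trans (okB_iff vs).symm
  cases hc : checkSafeA vs <;> cases ho : okB vs <;> simp_all

-- key: removing any index other than the two of a bad pair leaves the list unsafe
theorem removal_miss (vs : List Int) (i j : Nat) (hi : i + 1 < vs.length)
    (hbad : goodPair vs[i] vs[i+1] = false) (hj : j < vs.length)
    (hne1 : j ≠ i) (hne2 : j ≠ i + 1) :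
    okB (vs.take j ++ vs.drop (j + 1)) = false := by
  rw [← List.eraseIdx_eq_take_drop_succ]
  by_contra hok
  rw [Bool.not_eq_false] at hok
  have hga := (okB_iff _).mp hok
  have hlen : (vs.eraseIdx j).length = vs.length - 1 := by
    simp [List.length_eraseIdx, hj]
  rcases Nat.lt_or_ge j i with hji | hji
  · have hk : (i - 1) + 1 < (vs.eraseIdx j).length := by omega
    have h2 := hga (i - 1) hk
    rw [List.getElem_eraseIdx_of_ge _ (by omega),
        List.getElem_eraseIdx_of_ge _ (by omega)] at h2
    simp only [Nat.sub_add_cancel (by omega : 1 ≤ i)] at h2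
    rw [hbad] at h2
    exact absurd h2 (by simp)
  · have hj2 : i + 2 ≤ j := by omega
    have hk : i + 1 < (vs.eraseIdx j).length := by omega
    have h2 := hga i hk
    rw [List.getElem_eraseIdx_of_lt _ (by omega),
        List.getElem_eraseIdx_of_lt _ (by omega)] at h2
    rw [hbad] at h2
    exact absurd h2 (by simp)

-- ===== VERDICT (by name: the statement is the Claim_ definition above) =====
theorem OneToThree_spec : Claim_equal_OneToThree := by
  intro values _
  unfold Spec_OneToThree OneToThree OneToThree_alt
  cases hfb : firstBad values with
  | none =>
    have hok : okB values = true := (firstBad_none_iff values).mp hfb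
    rw [checkSafeA_eq_okB, hok]
    simp
  | some i =>
    obtain ⟨hlen, hbad⟩ := firstBad_some values i hfb
    have hok : okB values = false := by
      cases h : okB values
      · rfl
      · rw [← firstBad_none_iff values] at h
        rw [h] at hfb
        exact absurd hfb (by simp)
    rw [checkSafeA_eq_okB, hok]
    simp only [Bool.false_eq_true, if_false]
    have hany : ((PySem.List.pyRange 0 (values.length : Int) 1).any (fun i =>
        checkSafeA (PySem.List.slice values none (some i) ++
                    PySem.List.slice values (some (i + 1)) none)))
        = (okB (values.take i ++ values.drop (i + 1)) ||
           okB (values.take (i + 1) ++ values.drop (i + 2))) := by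
      cases horb : (okB (values.take i ++ values.drop (i + 1)) ||
           okB (values.take (i + 1) ++ values.drop (i + 2)))
      · rw [List.any_eq_false]
        intro x hx
        rw [PySem.List.mem_pyRange_one] at hx
        obtain ⟨hx0, hx1⟩ := hx
        rw [PySem.List.slice_to _ hx0, PySem.List.slice_from _ (by omega)]
        have e : (x + 1).toNat = x.toNat + 1 := by omega
        rw [e, checkSafeA_eq_okB]
        rw [Bool.or_eq_false_iff] at horb
        by_cases h1 : x.toNat = i
        · rw [h1]; simp [horb.1]
        · by_cases h2 : x.toNat = i + 1
          · rw [h2]; simp [horb.2]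
          · rw [removal_miss values i x.toNat hlen hbad (by omega) h1 h2]
            simp
      · rw [List.any_eq_true]
        rw [Bool.or_eq_true] at horb
        rcases horb with h1 | h1
        · refine ⟨(i : Int), ?_, ?_⟩
          · rw [PySem.List.mem_pyRange_one]; constructor <;> [positivity; omega]
          · rw [PySem.List.slice_to_natCast]
            rw [show ((i : Int) + 1) = ((i + 1 : Nat) : Int) by push_cast; ring,
              PySem.List.slice_from_natCast, checkSafeA_eq_okB, h1]
        · refine ⟨((i + 1 : Nat) : Int), ?_, ?_⟩
          · rw [PySem.List.mem_pyRange_one]; constructor <;> [positivity; omega]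
          · rw [PySem.List.slice_to_natCast]
            rw [show (((i + 1 : Nat) : Int) + 1) = ((i + 2 : Nat) : Int) by push_cast; ring,
              PySem.List.slice_from_natCast, checkSafeA_eq_okB, h1]
    rw [hany]
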